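-- pv_equiv track=rewrite | github.com/razahai/academic | courses/tjhsst/ai/2/nn/nn1.py | init_nn
-- ===== SOURCE A (Python) =====
-- def init_nn(inputs, weights):
--
--     _nn = []
--
--     for l in range(len(weights)-1, -1, -1):
--         if l == len(weights)-1: # output layer
--             _nn.append([0] * len(weights[l]))
--         else:
--             _nn.append([0] * (len(weights[l]) // len(_nn[len(_nn)-1]))) # int div just in case
--
--     _nn.reverse()
--     _nn[0] = inputs
--
--     return _nn
-- ===== SOURCE B (Python) =====
-- def init_nn(inputs, weights):
--     # Structural recursion computing the layer-size chain from the back,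
--     # then a single forward comprehension; no reverse, no in-loop special case.
--     def sizes(ws):
--         if len(ws) == 1:
--             return [len(ws[0])]
--         rest = sizes(ws[1:])
--         return [len(ws[0]) // rest[0]] + rest
--     return [inputs] + [[0] * n for n in sizes(weights)[1:]]
-- ===== Notes on version B (the rewrite author's own statement) =====
-- stated objective: simpler
-- what changed: B computes the layer-size chain by structural recursion on the weight list and then builds the network with one forward comprehension, removing A's in-loop output-layer special case, the append-then-reverse pattern and the _nn[0] overwrite.
import Mathlib
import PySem

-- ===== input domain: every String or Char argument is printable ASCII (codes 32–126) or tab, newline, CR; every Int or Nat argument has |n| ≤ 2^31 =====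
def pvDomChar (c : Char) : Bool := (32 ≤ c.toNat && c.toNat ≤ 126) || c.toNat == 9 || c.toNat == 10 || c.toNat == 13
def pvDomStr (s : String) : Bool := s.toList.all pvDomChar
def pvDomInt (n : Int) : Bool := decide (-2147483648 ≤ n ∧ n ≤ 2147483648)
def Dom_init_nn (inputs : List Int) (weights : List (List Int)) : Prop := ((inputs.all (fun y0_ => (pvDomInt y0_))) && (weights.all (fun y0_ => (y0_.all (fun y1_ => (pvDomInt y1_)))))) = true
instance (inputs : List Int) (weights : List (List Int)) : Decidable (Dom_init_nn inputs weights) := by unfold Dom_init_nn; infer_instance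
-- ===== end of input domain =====

-- B replaces A's backward append/reverse/overwrite loop by a recursive size-chain plus a
-- forward build (objective: simpler). Equivalence of RETURN values only.

-- ===== PORT A =====
-- Literal port of A's backward loop. Indexing weights[l] / _nn[len(_nn)-1] via pyGet?
-- with a [] fallback and Nat division (0 on zero divisor) only matter where Python A
-- raises (empty weights → IndexError; zero divisor → ZeroDivisionError), excluded by Pre_.
def init_nn (inputs : List Int) (weights : List (List Int)) : List (List Int) :=
  let nn := (PySem.List.pyRange ((weights.length : Int) - 1) (-1) (-1)).foldl
    (fun acc l =>
      if l = (weights.length : Int) - 1 then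
        acc ++ [List.replicate ((PySem.List.pyGet? weights l).getD []).length (0 : Int)]
      else
        acc ++ [List.replicate
          (((PySem.List.pyGet? weights l).getD []).length /
            ((PySem.List.pyGet? acc ((acc.length : Int) - 1)).getD []).length) (0 : Int)])
    []
  match nn.reverse with
  | [] => []            -- Python raises IndexError at _nn[0] = inputs here (weights = [])
  | _ :: t => inputs :: t

-- ===== PORT B =====
-- sizes(ws): structural recursion from Source B (sizes([]) unreached inside Pre_; Python
-- recursion would not terminate there, outside Pre_)
def altSizes : List (List Int) → List Nat
  | [] => []
  | [w] => [w.length]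
  | w :: ws@(_ :: _) =>
    let rest := altSizes ws
    (w.length / rest.headD 0) :: rest

def init_nn_alt (inputs : List Int) (weights : List (List Int)) : List (List Int) :=
  inputs :: (altSizes weights).tail.map (fun n => List.replicate n (0 : Int))

-- ===== PRECONDITION & SPEC =====
-- The layer-size chain over the weight-row lengths (a function of the input shape only;
-- neither port is referenced).
def sizeChain : List Nat → List Nat
  | [] => []
  | a :: ls =>
    let r := sizeChain ls
    (if r.isEmpty then a else a / r.headD 0) :: r

-- Pre_ excludes exactly the inputs where Python A raises: empty weights (IndexError at
-- _nn[0] = inputs) and a zero intermediate layer size used as divisor (ZeroDivisionError).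
def Pre_init_nn (inputs : List Int) (weights : List (List Int)) : Prop :=
  weights ≠ [] ∧ (sizeChain (weights.map (·.length))).tail.all (· ≠ 0)

instance (inputs : List Int) (weights : List (List Int)) : Decidable (Pre_init_nn inputs weights) := by
  unfold Pre_init_nn; infer_instance

def pvWitness_init_nn : List Int × List (List Int) := ([7, 8], [[1, 2, 3, 4], [5, 6]])

def Spec_init_nn (inputs : List Int) (weights : List (List Int)) (out : List (List Int)) : Prop := out = init_nn_alt inputs weights
instance (inputs : List Int) (weights : List (List Int)) (out : List (List Int)) : Decidable (Spec_init_nn inputs weights out) := by unfold Spec_init_nn; infer_instance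

-- ===== CLAIM (what is proved, stated in full; the proofs are below) =====
def Claim_equal_init_nn : Prop := ∀ (inputs : List Int) (weights : List (List Int)), Dom_init_nn inputs weights → Pre_init_nn inputs weights → Spec_init_nn inputs weights (init_nn inputs weights)

-- ===== LEMMAS AND PROOFS =====

def pvRow (n : Nat) : List Int := List.replicate n (0 : Int)

theorem altSizes_ne_nil (ws : List (List Int)) (h : ws ≠ []) : altSizes ws ≠ [] := by
  match ws with
  | [] => exact absurd rfl h
  | [w] => simp [altSizes]
  | w :: x :: ws => simp [altSizes]

theorem altSizes_cons (w : List Int) (ws : List (List Int)) (h : ws ≠ []) :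
    altSizes (w :: ws) = (w.length / (altSizes ws).headD 0) :: altSizes ws := by
  match ws with
  | [] => exact absurd rfl h
  | x :: ws => simp only [altSizes]

-- the loop body of port A, abstracted over the fixed weights
def pvStep (weights : List (List Int)) (acc : List (List Int)) (l : Int) : List (List Int) :=
  if l = (weights.length : Int) - 1 then
    acc ++ [List.replicate ((PySem.List.pyGet? weights l).getD []).length (0 : Int)]
  else
    acc ++ [List.replicate
      (((PySem.List.pyGet? weights l).getD []).length /
        ((PySem.List.pyGet? acc ((acc.length : Int) - 1)).getD []).length) (0 : Int)]

theorem pvStep_inv (weights : List (List Int)) (k : Nat) (hk : k < weights.length) :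
    pvStep weights (((altSizes (weights.drop (k + 1))).map pvRow).reverse) (k : Int)
      = ((altSizes (weights.drop k)).map pvRow).reverse := by
  have hdrop : weights.drop k = weights[k] :: weights.drop (k + 1) :=
    List.drop_eq_getElem_cons hk
  by_cases hlast : k = weights.length - 1
  · -- output layer: drop (k+1) = []
    have h1 : weights.drop (k + 1) = [] := by
      apply List.drop_eq_nil_of_le; omega
    have h2 : weights.drop k = [weights[k]] := by rw [hdrop, h1]
    rw [pvStep, if_pos (by omega), h1, h2]
    rw [PySem.List.pyGet?_natCast, List.getElem?_eq_getElem hk]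
    simp [altSizes, pvRow]
  · -- inner layer
    have hne : weights.drop (k + 1) ≠ [] := by
      intro h; rw [List.drop_eq_nil_iff] at h; omega
    have hLne : altSizes (weights.drop (k + 1)) ≠ [] := altSizes_ne_nil _ hne
    obtain ⟨s, L, hL⟩ : ∃ s L, altSizes (weights.drop (k + 1)) = s :: L :=
      List.exists_cons_of_ne_nil hLne
    rw [pvStep, if_neg (by omega)]
    rw [PySem.List.pyGet?_natCast, List.getElem?_eq_getElem hk]
    rw [hdrop, altSizes_cons _ _ hne, hL]
    simp only [List.map_cons, List.reverse_cons]
    have hidx : ((((List.map pvRow L).reverse ++ [pvRow s]).length : Int)) - 1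
        = (((List.map pvRow L).reverse.length : Nat) : Int) := by simp
    rw [hidx, PySem.List.pyGet?_append_length]
    simp [pvRow]

theorem pvLoop_inv (weights : List (List Int)) (k : Nat) (hk : k < weights.length) :
    (PySem.List.pyRange (k : Int) (-1) (-1)).foldl (pvStep weights)
        (((altSizes (weights.drop (k + 1))).map pvRow).reverse)
      = ((altSizes weights).map pvRow).reverse := by
  induction k with
  | zero =>
    rw [PySem.List.pyRange_neg_one_cons (by omega)]
    rw [PySem.List.pyRange_neg_one_eq_nil (by omega)]
    have := pvStep_inv weights 0 hk
    simpa using this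
  | succ k ih =>
    rw [PySem.List.pyRange_neg_one_cons (by omega)]
    rw [List.foldl_cons]
    rw [pvStep_inv weights (k + 1) hk]
    have : ((k : Int) + 1 - 1) = (k : Int) := by omega
    rw [show (((k + 1 : Nat) : Int) - 1) = (k : Int) by push_cast; omega]
    exact ih (by omega)

theorem init_nn_eq (inputs : List Int) (weights : List (List Int)) (h : weights ≠ []) :
    init_nn inputs weights = init_nn_alt inputs weights := by
  have hlen : 0 < weights.length := List.length_pos_iff.mpr h
  have hfold := pvLoop_inv weights (weights.length - 1) (by omega)
  have hdropall : weights.drop (weights.length - 1 + 1) = [] := by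
    apply List.drop_eq_nil_of_le; omega
  rw [hdropall] at hfold
  simp only [altSizes, List.map_nil, List.reverse_nil] at hfold
  rw [init_nn, init_nn_alt]
  have hcast : ((weights.length : Int) - 1) = ((weights.length - 1 : Nat) : Int) := by omega
  rw [show (fun (acc : List (List Int)) (l : Int) =>
      if l = (weights.length : Int) - 1 then
        acc ++ [List.replicate ((PySem.List.pyGet? weights l).getD []).length (0 : Int)]
      else
        acc ++ [List.replicate
          (((PySem.List.pyGet? weights l).getD []).length /
            ((PySem.List.pyGet? acc ((acc.length : Int) - 1)).getD []).length) (0 : Int)])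
    = pvStep weights from by funext acc l; rfl]
  rw [hcast, hfold, List.reverse_reverse]
  obtain ⟨s, L, hL⟩ : ∃ s L, altSizes weights = s :: L :=
    List.exists_cons_of_ne_nil (altSizes_ne_nil _ h)
  rw [hL]
  simp [pvRow]

-- ===== VERDICT (by name: the statement is the Claim_ definition above) =====
theorem init_nn_spec : Claim_equal_init_nn := by
  intro inputs weights _ hpre
  exact init_nn_eq inputs weights hpre.1
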